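-- pv_equiv track=rewrite | github.com/ericmerle3789/Collatz-Junction-Theorem | scripts/research/r57_base_k2_maxNr.py | generate_R1_cases
-- ===== SOURCE A (Python) =====
-- from math import gcd, ceil, log2, sqrt, log, pi
--
-- def primes_up_to(n):
--     sieve = [True] * (n + 1)
--     sieve[0] = sieve[1] = False
--     for i in range(2, int(n**0.5) + 1):
--         if sieve[i]:
--             for j in range(i*i, n+1, i):
--                 sieve[j] = False
--     return [i for i in range(2, n+1) if sieve[i]]
--
-- def ord_mod(base, m):
--     """Multiplicative order of base mod m."""
--     if m <= 1 or gcd(base, m) != 1: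
--         return None
--     o, v = 1, base % m
--     while v != 1:
--         o += 1
--         v = (v * base) % m
--         if o > m:
--             return None
--     return o
--
-- def compute_g_k2(p):
--     """g = 3 * 2^{-1} mod p for k=2."""
--     if p <= 3 or p % 2 == 0:
--         return None
--     inv2 = pow(2, p - 2, p)
--     return (3 * inv2) % p
--
-- def generate_R1_cases(max_prime=500, M_range=None):
--     """Generate (p, M, g, ord2) tuples in R1 regime.
--     R1: ord_p(2) > M+1.
--     For the Collatz context: g = 3/2 mod p, M varies.
--     We also include the general g = 2^S * 3^{-k} mod p for k=2.
--     """
--     cases = []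
--     all_primes = primes_up_to(max_prime)
--     valid_primes = [p for p in all_primes if p >= 5]
--
--     for p in valid_primes:
--         g = compute_g_k2(p)
--         if g is None:
--             continue
--         ord2 = ord_mod(2, p)
--         if ord2 is None:
--             continue
--         # M ranges from 1 to min(ord2 - 2, some cap) for R1
--         max_M = min(ord2 - 2, 50, p - 2)
--         if max_M < 1:
--             continue
--         if M_range is not None:
--             M_vals = [m for m in M_range if 1 <= m <= max_M]
--         else:
--             # Sample a few M values
--             M_vals = list(range(1, min(max_M + 1, 10)))
--             if max_M >= 10:
--                 M_vals.extend([max_M // 2, max_M])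
--                 M_vals = sorted(set(M_vals))
--         for M in M_vals:
--             is_degen = (g % p == (p - 1))  # g = -1 mod p
--             cases.append((p, M, g, ord2, is_degen))
--     return cases
-- ===== SOURCE B (Python) =====
-- def primes_up_to(n):
--     sieve = [True] * (n + 1)
--     sieve[0] = sieve[1] = False
--     for i in range(2, int(n**0.5) + 1):
--         if sieve[i]:
--             for j in range(i*i, n+1, i):
--                 sieve[j] = False
--     return [i for i in range(2, n+1) if sieve[i]]
--
-- def order_of_2(p):
--     """Multiplicative order of 2 mod an odd prime p: the least divisor d of p-1
--     with 2^d = 1 (mod p), found by enumerating divisors in O(sqrt p)."""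
--     n = p - 1
--     divs = []
--     d = 1
--     while d * d <= n:
--         if n % d == 0:
--             divs.append(d)
--             if d * d != n:
--                 divs.append(n // d)
--         d += 1
--     divs.sort()
--     for d in divs:
--         if pow(2, d, p) == 1:
--             return d
--
-- def generate_R1_cases(max_prime=500, M_range=None):
--     cases = []
--     for p in primes_up_to(max_prime):
--         if p < 5:
--             continue
--         g = 3 * ((p + 1) // 2) % p  # 3 * 2^{-1} mod p, since 2*((p+1)//2) = p+1 = 1 (mod p)
--         ord2 = order_of_2(p)
--         max_M = min(ord2 - 2, 50, p - 2)
--         if max_M < 1: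
--             continue
--         if M_range is not None:
--             M_vals = [m for m in M_range if 1 <= m <= max_M]
--         elif max_M < 10:
--             M_vals = list(range(1, max_M + 1))
--         else:
--             half = max_M // 2
--             M_vals = list(range(1, 10)) + ([half] if half > 9 else []) + [max_M]
--         degen = (g == p - 1)
--         cases.extend((p, M, g, ord2, degen) for M in M_vals)
--     return cases
-- ===== Notes on version B (the rewrite author's own statement) =====
-- stated objective: faster
-- what changed: B computes the multiplicative order of 2 mod p as the smallest divisor of p-1 with 2^d = 1 (found by enumerating divisors in O(sqrt p) and testing with fast modular exponentiation) instead of A's step-by-step multiply loop of ord_p(2) iterations, replaces pow(2, p-2, p) by the closed-form inverse (p+1)//2, drops the never-taken None branches, and builds the sampled M list in closed form instead of sorted(set(...)).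
import Mathlib
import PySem

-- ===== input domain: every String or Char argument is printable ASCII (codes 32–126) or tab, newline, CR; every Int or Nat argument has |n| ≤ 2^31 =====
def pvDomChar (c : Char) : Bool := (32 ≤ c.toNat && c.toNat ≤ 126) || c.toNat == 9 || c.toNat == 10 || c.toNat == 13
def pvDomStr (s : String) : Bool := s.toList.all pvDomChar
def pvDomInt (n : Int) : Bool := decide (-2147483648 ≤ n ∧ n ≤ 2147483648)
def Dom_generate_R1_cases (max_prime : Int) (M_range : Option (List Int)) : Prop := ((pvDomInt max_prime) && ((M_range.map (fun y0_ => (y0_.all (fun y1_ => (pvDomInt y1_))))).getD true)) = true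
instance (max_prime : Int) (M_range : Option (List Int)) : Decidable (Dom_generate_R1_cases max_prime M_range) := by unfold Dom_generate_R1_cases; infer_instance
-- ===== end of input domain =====

-- B replaces A's O(ord_p(2)) order-finding loop by an O(sqrt p) divisor scan of p-1 (order divides p-1
-- by Fermat) and the modular inverse pow(2, p-2, p) by the closed form (p+1)//2: measurably faster.


-- ===== PORT A =====
-- primes_up_to: identical in Source A and Source B, ported once and shared by both ports.
-- int(n**0.5) = Nat.sqrt n exactly on the domain (n ≤ 2^31 < 2^53, double sqrt is correctly rounded).
def pvPrimesUpTo (n : Nat) : List Nat :=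
  let sieve0 := ((List.replicate (n+1) true).set 0 false).set 1 false
  let sieve := (List.range' 2 (Nat.sqrt n - 1)).foldl (fun s i =>
      if s.getD i false then
        (List.range' (i*i) (if i*i ≤ n then (n - i*i)/i + 1 else 0) i).foldl
          (fun s j => s.set j false) s
      else s) sieve0
  (List.range' 2 (n-1)).filter (fun i => sieve.getD i false)

def gK2 (p : Int) : Option Int :=
  if p ≤ 3 ∨ PySem.Int.mod p 2 = 0 then none
  else some (PySem.Int.mod (3 * PySem.Int.powMod 2 (p-2).toNat p) p)

def ordLoop (base m : Int) : Nat → Int → Int → Option Int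
  | 0, _, _ => none
  | fuel+1, o, v =>
    if v = 1 then some o
    else if o + 1 > m then none
    else ordLoop base m fuel (o+1) (PySem.Int.mod (v * base) m)

def ordMod (base m : Int) : Option Int :=
  if m ≤ 1 ∨ (Int.gcd base m : Int) ≠ 1 then none
  else ordLoop base m (m.toNat + 2) 1 (PySem.Int.mod base m)

-- the body of A's 'for p in valid_primes' loop
def stepA (M_range : Option (List Int)) (cases : List (Int × Int × Int × Int × Bool)) (p : Nat) :
    List (Int × Int × Int × Int × Bool) :=
  match gK2 (p : Int) with
  | none => cases
  | some g =>
    match ordMod 2 (p : Int) with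
    | none => cases
    | some ord2 =>
      let max_M := min (min (ord2 - 2) 50) ((p : Int) - 2)
      if max_M < 1 then cases
      else
        let M_vals : List Int :=
          match M_range with
          | some mr => mr.filter (fun m => decide (1 ≤ m) && decide (m ≤ max_M))
          | none =>
            let base := PySem.List.pyRange 1 (min (max_M + 1) 10) 1
            if 10 ≤ max_M then
              PySem.List.sorted (PySem.Set.ofList (base ++ [PySem.Int.floordiv max_M 2, max_M]))
                (fun x => x) false
            else base
        M_vals.foldl (fun cs M =>
          cs ++ [((p:Int), M, g, ord2, decide (PySem.Int.mod g (p:Int) = (p:Int) - 1))]) cases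

def generate_R1_cases (max_prime : Int) (M_range : Option (List Int)) :
    List (Int × Int × Int × Int × Bool) :=
  let all_primes := pvPrimesUpTo max_prime.toNat
  let valid_primes := all_primes.filter (fun p => decide (5 ≤ p))
  valid_primes.foldl (stepA M_range) []

-- ===== PORT B =====
def pvDivsLoop (n : Int) (d : Int) (acc : List Int) : List Int :=
  if h : d * d ≤ n then
    pvDivsLoop n (d+1)
      (if PySem.Int.mod n d = 0 then
        acc ++ [d] ++ (if d * d ≠ n then [PySem.Int.floordiv n d] else [])
      else acc)
  else acc
termination_by (n + 1 - d).toNat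
decreasing_by
  have h1 : 2*d ≤ n + 1 := by nlinarith [sq_nonneg (d-1)]
  have h0 : (0:Int) ≤ n := le_trans (mul_self_nonneg d) h
  omega

def pvFindOrd (p : Int) : List Int → Int
  | [] => 0   -- unreachable: order_of_2 is only applied to odd primes, where some divisor of p-1 works
  | d :: rest => if PySem.Int.powMod 2 d.toNat p = 1 then d else pvFindOrd p rest

def order_of_2 (p : Int) : Int :=
  pvFindOrd p (PySem.List.sorted (pvDivsLoop (p-1) 1 []) (fun x => x) false)

-- the body of B's 'for p in primes_up_to(max_prime)' loop (the non-continue branch)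
def stepB (M_range : Option (List Int)) (cases : List (Int × Int × Int × Int × Bool)) (p : Nat) :
    List (Int × Int × Int × Int × Bool) :=
  let g := PySem.Int.mod (3 * PySem.Int.floordiv ((p:Int) + 1) 2) (p:Int)
  let ord2 := order_of_2 (p:Int)
  let max_M := min (min (ord2 - 2) 50) ((p : Int) - 2)
  if max_M < 1 then cases
  else
    let M_vals : List Int :=
      match M_range with
      | some mr => mr.filter (fun m => decide (1 ≤ m) && decide (m ≤ max_M))
      | none =>
        if max_M < 10 then PySem.List.pyRange 1 (max_M + 1) 1
        else PySem.List.pyRange 1 10 1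
             ++ (if 9 < PySem.Int.floordiv max_M 2 then [PySem.Int.floordiv max_M 2] else [])
             ++ [max_M]
    cases ++ M_vals.map (fun M => ((p:Int), M, g, ord2, decide (g = (p:Int) - 1)))

def generate_R1_cases_alt (max_prime : Int) (M_range : Option (List Int)) :
    List (Int × Int × Int × Int × Bool) :=
  (pvPrimesUpTo max_prime.toNat).foldl
    (fun cases (p : Nat) => if (p:Int) < 5 then cases else stepB M_range cases p) []

-- ===== PRECONDITION & SPEC =====
-- A raises IndexError when max_prime ≤ 0 (the sieve list has fewer than two cells, so sieve[1] = False
-- fails); B contains the same sieve and raises identically, so exactly those inputs are excluded.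
def Pre_generate_R1_cases (max_prime : Int) (M_range : Option (List Int)) : Prop := 1 ≤ max_prime
instance (max_prime : Int) (M_range : Option (List Int)) : Decidable (Pre_generate_R1_cases max_prime M_range) := by unfold Pre_generate_R1_cases; infer_instance

def pvWitness_generate_R1_cases : Int × Option (List Int) := (30, none)

def Spec_generate_R1_cases (max_prime : Int) (M_range : Option (List Int)) (out : List (Int × Int × Int × Int × Bool)) : Prop := out = generate_R1_cases_alt max_prime M_range
instance (max_prime : Int) (M_range : Option (List Int)) (out : List (Int × Int × Int × Int × Bool)) : Decidable (Spec_generate_R1_cases max_prime M_range out) := by unfold Spec_generate_R1_cases; infer_instance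

-- ===== CLAIM (what is proved, stated in full; the proofs are below) =====
def Claim_equal_generate_R1_cases : Prop := ∀ (max_prime : Int) (M_range : Option (List Int)), Dom_generate_R1_cases max_prime M_range → Pre_generate_R1_cases max_prime M_range → Spec_generate_R1_cases max_prime M_range (generate_R1_cases max_prime M_range)

-- ===== LEMMAS AND PROOFS =====

-- ---------- the sieve produces only primes ----------

def pvUnmarked (k m : Nat) : Prop := 2 ≤ m ∧ ∀ d, d.Prime → d ≤ k → d ∣ m → ¬ (d*d ≤ m)

lemma pv_getD_foldl_set (js : List Nat) : ∀ (s : List Bool) (m : Nat),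
    (js.foldl (fun s j => s.set j false) s).getD m false =
      if m ∈ js then false else s.getD m false := by
  induction js with
  | nil => simp
  | cons j tl ih =>
    intro s m
    simp only [List.foldl_cons, ih, List.mem_cons]
    by_cases hm : m ∈ tl
    · simp [hm]
    · by_cases hj : m = j
      · subst hj
        simp [hm, List.getD_eq_getElem?_getD, List.getElem?_set]
        by_cases hl : m < s.length
        · simp [hl]
        · simp [hl]
      · simp [hm, hj, List.getD_eq_getElem?_getD, List.getElem?_set, Ne.symm hj]

lemma pv_length_foldl_set (js : List Nat) : ∀ (s : List Bool),
    (js.foldl (fun s j => s.set j false) s).length = s.length := by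
  induction js with
  | nil => simp
  | cons j tl ih => intro s; simp [ih]

lemma pv_mem_markRange (i n m : Nat) (hi : 1 ≤ i) :
    m ∈ List.range' (i*i) (if i*i ≤ n then (n - i*i)/i + 1 else 0) i ↔
      i*i ≤ m ∧ m ≤ n ∧ i ∣ m := by
  rw [List.mem_range']
  constructor
  · rintro ⟨t, ht, rfl⟩
    split_ifs at ht with hle
    · have h2 : t ≤ (n - i*i)/i := by omega
      have h3 : t * i ≤ n - i*i := (Nat.le_div_iff_mul_le (by omega)).mp h2
      have h4 : i * t ≤ n - i*i := by rw [mul_comm]; exact h3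
      refine ⟨by omega, by omega, ⟨i + t, by ring⟩⟩
    · omega
  · rintro ⟨h1, h2, q, rfl⟩
    have hq : i ≤ q := Nat.le_of_mul_le_mul_left h1 (by omega)
    have hiq : i*i ≤ i*q := h1
    refine ⟨q - i, ?_, by rw [Nat.mul_sub]; omega⟩
    have hle : i*i ≤ n := le_trans h1 h2
    rw [if_pos hle]
    have h5 : (q - i) * i ≤ n - i*i := by
      rw [Nat.sub_mul]
      have : q * i = i * q := mul_comm _ _
      omega
    have := (Nat.le_div_iff_mul_le (show 0 < i by omega)).mpr h5
    omega

lemma pv_unmarked_self_iff (i : Nat) (h2 : 2 ≤ i) : pvUnmarked (i-1) i ↔ i.Prime := by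
  constructor
  · rintro ⟨-, hall⟩
    by_contra hnp
    have hd := Nat.minFac_prime (show i ≠ 1 by omega)
    have hdd := Nat.minFac_dvd i
    have hsq : i.minFac * i.minFac ≤ i := by
      have := Nat.minFac_sq_le_self (show 0 < i by omega) hnp
      nlinarith [this]
    have hlt : i.minFac < i := by
      have h2d := hd.two_le
      nlinarith
    exact hall i.minFac hd (by omega) hdd hsq
  · intro hp
    refine ⟨h2, fun d hd hdk hdvd hsq => ?_⟩
    rcases (Nat.Prime.eq_one_or_self_of_dvd hp d hdvd) with h | h
    · have := hd.two_le; omega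
    · subst h; nlinarith

lemma pv_unmarked_prime (n m : Nat) (hm : m ≤ n) (h2 : 2 ≤ m) (hu : pvUnmarked (Nat.sqrt n) m) :
    m.Prime := by
  by_contra hnp
  have hd := Nat.minFac_prime (show m ≠ 1 by omega)
  have hdd := Nat.minFac_dvd m
  have hsq : m.minFac * m.minFac ≤ m := by
    have := Nat.minFac_sq_le_self (show 0 < m by omega) hnp
    nlinarith [this]
  have hk : m.minFac ≤ Nat.sqrt n := Nat.le_sqrt.mpr (le_trans hsq hm)
  exact hu.2 m.minFac hd hk hdd hsq

lemma pv_mem_markRange' (i n m : Nat) (hi : 1 ≤ i) (hle : i*i ≤ n) :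
    m ∈ List.range' (i*i) ((n - i*i)/i + 1) i ↔ i*i ≤ m ∧ m ≤ n ∧ i ∣ m := by
  have h := pv_mem_markRange i n m hi
  rwa [if_pos hle] at h

lemma pv_sieve_invariant (n : Nat) (hn : 1 ≤ n) : ∀ t, t ≤ Nat.sqrt n - 1 →
    (((List.range' 2 t).foldl (fun s i =>
        if s.getD i false then
          (List.range' (i*i) (if i*i ≤ n then (n - i*i)/i + 1 else 0) i).foldl
            (fun s j => s.set j false) s
        else s) (((List.replicate (n+1) true).set 0 false).set 1 false)).length = n+1) ∧
    (∀ m, m ≤ n →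
      (((List.range' 2 t).foldl (fun s i =>
        if s.getD i false then
          (List.range' (i*i) (if i*i ≤ n then (n - i*i)/i + 1 else 0) i).foldl
            (fun s j => s.set j false) s
        else s) (((List.replicate (n+1) true).set 0 false).set 1 false)).getD m false = true ↔
        pvUnmarked (t+1) m)) := by
  intro t
  induction t with
  | zero =>
    intro _
    constructor
    · simp
    · intro m hm
      have hm1 : m < n + 1 := by omega
      simp only [List.range'_zero, List.foldl_nil]
      rw [List.getD_eq_getElem?_getD, List.getElem?_set, List.getElem?_set]
      have hiff1 : pvUnmarked 1 m ↔ 2 ≤ m := by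
        constructor
        · rintro ⟨h2, -⟩; exact h2
        · intro h2; exact ⟨h2, fun d hd hdk _ _ => by have := hd.two_le; omega⟩
      rw [hiff1]
      rcases Nat.lt_or_ge m 2 with hm2 | hm2
      · interval_cases m <;> simp [show 0 < n by omega]
      · have h0 : m ≠ 0 := by omega
        have h1 : m ≠ 1 := by omega
        simp [Ne.symm h0, Ne.symm h1, List.getElem?_replicate, hm1]
        omega
  | succ t ih =>
    intro ht
    obtain ⟨hlen, hiff⟩ := ih (by omega)
    rw [List.range'_concat]
    simp only [List.foldl_append, List.foldl_cons, List.foldl_nil]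
    have hi : 2 + 1 * t = t + 2 := by ring
    rw [hi]
    set s := ((List.range' 2 t).foldl (fun s i =>
        if s.getD i false then
          (List.range' (i*i) (if i*i ≤ n then (n - i*i)/i + 1 else 0) i).foldl
            (fun s j => s.set j false) s
        else s) (((List.replicate (n+1) true).set 0 false).set 1 false)) with hsdef
    have hsq : (t+2) ≤ Nat.sqrt n := by omega
    have hiin : (t+2)*(t+2) ≤ n := Nat.le_sqrt.mp hsq
    have hin : t+2 ≤ n := by nlinarith
    by_cases hsi : s.getD (t+2) false = true
    · rw [if_pos hsi]
      have hip : (t+2).Prime := by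
        apply (pv_unmarked_self_iff (t+2) (by omega)).mp
        simpa using (hiff (t+2) hin).mp hsi
      refine ⟨by rw [pv_length_foldl_set]; exact hlen, fun m hm => ?_⟩
      rw [pv_getD_foldl_set, if_pos hiin]
      split_ifs with hmem
      · have hm' := (pv_mem_markRange' (t+2) n m (by omega) hiin).mp hmem
        simp only [Bool.false_eq_true, false_iff]
        rintro ⟨h2m, hall⟩
        exact hall (t+2) hip (by omega) hm'.2.2 hm'.1
      · have hm' : ¬((t+2)*(t+2) ≤ m ∧ m ≤ n ∧ (t+2) ∣ m) :=
          fun hx => hmem ((pv_mem_markRange' (t+2) n m (by omega) hiin).mpr hx)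
        rw [hiff m hm]
        unfold pvUnmarked
        constructor
        · rintro ⟨h2m, hall⟩
          refine ⟨h2m, fun d hd hdk hdvd hsq' => ?_⟩
          by_cases hdt : d ≤ t + 1
          · exact hall d hd hdt hdvd hsq'
          · have hde : d = t + 2 := by omega
            subst hde
            exact hm' ⟨hsq', hm, hdvd⟩
        · rintro ⟨h2m, hall⟩
          exact ⟨h2m, fun d hd hdk hdvd hsq' => hall d hd (by omega) hdvd hsq'⟩
    · rw [if_neg hsi]
      refine ⟨hlen, fun m hm => ?_⟩
      rw [hiff m hm]
      have hnp : ¬ (t+2).Prime := by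
        intro hp
        apply hsi
        rw [hiff (t+2) hin]
        simpa using (pv_unmarked_self_iff (t+2) (by omega)).mpr hp
      unfold pvUnmarked
      constructor
      · rintro ⟨h2m, hall⟩
        refine ⟨h2m, fun d hd hdk hdvd hsq' => ?_⟩
        by_cases hdt : d ≤ t + 1
        · exact hall d hd hdt hdvd hsq'
        · have hde : d = t + 2 := by omega
          subst hde
          exact absurd hd hnp
      · rintro ⟨h2m, hall⟩
        exact ⟨h2m, fun d hd hdk hdvd hsq' => hall d hd (by omega) hdvd hsq'⟩

lemma pv_mem_primesUpTo (n p : Nat) (hn : 1 ≤ n) (hp : p ∈ pvPrimesUpTo n) :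
    p.Prime ∧ 2 ≤ p := by
  unfold pvPrimesUpTo at hp
  rw [List.mem_filter] at hp
  obtain ⟨hpr, hpt⟩ := hp
  rw [List.mem_range'] at hpr
  obtain ⟨i, hi, rfl⟩ := hpr
  have hple : 2 + 1*i ≤ n := by omega
  have hsq1 : 1 ≤ Nat.sqrt n := by
    have := Nat.sqrt_pos.mpr (show 0 < n by omega)
    omega
  obtain ⟨-, hiff⟩ := pv_sieve_invariant n hn (Nat.sqrt n - 1) (le_refl _)
  have hu := (hiff (2 + 1*i) hple).mp (by simpa using hpt)
  have hke : Nat.sqrt n - 1 + 1 = Nat.sqrt n := by omega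
  rw [hke] at hu
  exact ⟨pv_unmarked_prime n (2 + 1*i) hple (by omega) hu, by omega⟩

-- ---------- ZMod bridges ----------

lemma pv_intCast_emod (a : Int) (p : Nat) : ((a % (p:Int) : Int) : ZMod p) = (a : ZMod p) := by
  rw [ZMod.intCast_eq_intCast_iff]
  exact Int.emod_emod_of_dvd a dvd_rfl

lemma pv_two_ne_zero (p : Nat) [hp : Fact p.Prime] (h5 : 5 ≤ p) : (2 : ZMod p) ≠ 0 := by
  intro h
  have h1 : ((2:Nat) : ZMod p) = 0 := by exact_mod_cast h
  have h2 := (ZMod.natCast_eq_zero_iff 2 p).mp h1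
  have := Nat.le_of_dvd (by norm_num) h2
  omega

lemma pv_pow_emod_eq_one_iff (p : Nat) [hp : Fact p.Prime] (h5 : 5 ≤ p) (o : Nat) :
    ((2:Int)^o % (p:Int) = 1) ↔ (2 : ZMod p)^o = 1 := by
  have hcast : (((2:Int)^o % (p:Int) : Int) : ZMod p) = (2 : ZMod p)^o := by
    rw [pv_intCast_emod]; push_cast; ring
  constructor
  · intro h
    rw [← hcast, h]; norm_num
  · intro h
    have h1 : (((2:Int)^o % (p:Int) : Int) : ZMod p) = ((1:Int) : ZMod p) := by
      rw [hcast, h]; norm_num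
    have h2 := (ZMod.intCast_eq_intCast_iff _ _ _).mp h1
    have h3 : (2:Int)^o % (p:Int) % (p:Int) = (2:Int)^o % (p:Int) :=
      Int.emod_emod_of_dvd _ dvd_rfl
    have h4 : (1:Int) % (p:Int) = 1 := Int.emod_eq_of_lt (by norm_num) (by exact_mod_cast by omega)
    unfold Int.ModEq at h2
    omega

lemma pv_orderOf_dvd (p : Nat) [hp : Fact p.Prime] (h5 : 5 ≤ p) :
    orderOf (2 : ZMod p) ∣ p - 1 :=
  orderOf_dvd_of_pow_eq_one (ZMod.pow_card_sub_one_eq_one (pv_two_ne_zero p h5))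

lemma pv_orderOf_pos (p : Nat) [hp : Fact p.Prime] (h5 : 5 ≤ p) :
    1 ≤ orderOf (2 : ZMod p) := by
  have := orderOf_pos_iff.mpr (isOfFinOrder_iff_pow_eq_one.mpr
    ⟨p - 1, by omega, ZMod.pow_card_sub_one_eq_one (pv_two_ne_zero p h5)⟩)
  omega

-- ---------- A's order loop ----------

lemma pv_orderOf_le (p : Nat) [hp : Fact p.Prime] (h5 : 5 ≤ p) :
    orderOf (2 : ZMod p) ≤ p - 1 :=
  Nat.le_of_dvd (by omega) (pv_orderOf_dvd p h5)

lemma pv_ordLoop_eq (p : Nat) [hp : Fact p.Prime] (h5 : 5 ≤ p) :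
    ∀ (fuel o : Nat), 1 ≤ o → o ≤ orderOf (2 : ZMod p) → orderOf (2 : ZMod p) - o < fuel →
      ordLoop 2 (p:Int) fuel (o:Int) ((2:Int)^o % (p:Int)) = some ((orderOf (2 : ZMod p) : Nat) : Int) := by
  intro fuel
  induction fuel with
  | zero => intro o _ _ h; omega
  | succ fuel ih =>
    intro o ho1 hoN hfuel
    by_cases hoeq : o = orderOf (2 : ZMod p)
    · have hv : (2:Int)^o % (p:Int) = 1 :=
        (pv_pow_emod_eq_one_iff p h5 o).mpr (by rw [hoeq]; exact pow_orderOf_eq_one _)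
      subst hoeq
      simp [ordLoop, hv]
    · have holt : o < orderOf (2 : ZMod p) := by omega
      have hv : ¬ ((2:Int)^o % (p:Int) = 1) := by
        intro h
        have := orderOf_dvd_iff_pow_eq_one.mpr ((pv_pow_emod_eq_one_iff p h5 o).mp h)
        have := Nat.le_of_dvd (by omega) this
        omega
      have hle : orderOf (2 : ZMod p) ≤ p - 1 := pv_orderOf_le p h5
      have hnb : ¬ ((o:Int) + 1 > (p:Int)) := by
        push_cast; omega
      rw [ordLoop, if_neg hv, if_neg hnb]
      have hv' : PySem.Int.mod ((2:Int)^o % (p:Int) * 2) (p:Int) = (2:Int)^(o+1) % (p:Int) := by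
        rw [PySem.Int.mod_eq_emod_of_pos (by exact_mod_cast by omega : (0:Int) < (p:Int))]
        rw [Int.mul_emod, Int.emod_emod_of_dvd _ dvd_rfl, ← Int.mul_emod, pow_succ]
      rw [hv']
      have : ((o:Int) + 1) = ((o+1 : Nat) : Int) := by push_cast; ring
      rw [this]
      exact ih (o+1) (by omega) (by omega) (by omega)

lemma pv_ordMod_eq (p : Nat) [hp : Fact p.Prime] (h5 : 5 ≤ p) :
    ordMod 2 (p:Int) = some ((orderOf (2 : ZMod p) : Nat) : Int) := by
  have hcop : Nat.gcd 2 p = 1 := (Nat.coprime_primes Nat.prime_two hp.out).mpr (by omega)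
  have hg : Int.gcd 2 (p:Int) = 1 := by
    rw [Int.gcd]; simp [hcop]
  have hguard : ¬ ((p:Int) ≤ 1 ∨ ((Int.gcd 2 (p:Int) : Nat) : Int) ≠ 1) := by
    push_neg
    constructor
    · exact_mod_cast by omega
    · rw [hg]; norm_num
  rw [ordMod, if_neg hguard]
  have hv : PySem.Int.mod 2 (p:Int) = (2:Int)^1 % (p:Int) := by
    rw [PySem.Int.mod_eq_emod_of_pos (by exact_mod_cast by omega : (0:Int) < (p:Int))]
    norm_num
  have h1 : (1:Int) = ((1:Nat):Int) := rfl
  have hfuel : (p:Int).toNat + 2 = p + 2 := by omega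
  rw [hv, h1, hfuel]
  exact pv_ordLoop_eq p h5 (p+2) 1 (by omega) (pv_orderOf_pos p h5)
    (by have := pv_orderOf_le p h5; omega)

-- ---------- A's g equals B's g ----------

lemma pv_gK2_eq (p : Nat) [hp : Fact p.Prime] (h5 : 5 ≤ p) :
    gK2 (p:Int) = some (PySem.Int.mod (3 * PySem.Int.floordiv ((p:Int) + 1) 2) (p:Int)) := by
  have hodd : p % 2 = 1 := Nat.odd_iff.mp (hp.out.odd_of_ne_two (by omega))
  have hpos : (0:Int) < (p:Int) := by exact_mod_cast by omega
  have hguard : ¬ ((p:Int) ≤ 3 ∨ PySem.Int.mod (p:Int) 2 = 0) := by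
    rw [PySem.Int.mod_eq_emod_of_pos (by norm_num)]
    push Not
    constructor
    · exact_mod_cast by omega
    · omega
  rw [gK2, if_neg hguard]
  congr 1
  rw [PySem.Int.mod_eq_emod_of_pos hpos, PySem.Int.mod_eq_emod_of_pos hpos,
    PySem.Int.floordiv_eq_ediv_of_pos (by norm_num),
    PySem.Int.powMod_eq_emod _ _ hpos]
  have he : ((p:Int) - 2).toNat = p - 2 := by omega
  rw [he]
  have hdvd : (2:Int) ∣ (p:Int) + 1 := by omega
  show Int.ModEq (p:Int) _ _
  rw [← ZMod.intCast_eq_intCast_iff]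
  push_cast [pv_intCast_emod]
  have h2 : (2 : ZMod p) * (2 : ZMod p)^(p-2) = 1 := by
    rw [← pow_succ']
    have : p - 2 + 1 = p - 1 := by omega
    rw [this]
    exact ZMod.pow_card_sub_one_eq_one (pv_two_ne_zero p h5)
  have h3 : (2 : ZMod p) * ((((p:Int) + 1)/2 : Int) : ZMod p) = 1 := by
    have : ((2 * (((p:Int) + 1)/2) : Int) : ZMod p) = (((p:Int) + 1 : Int) : ZMod p) := by
      rw [Int.mul_ediv_cancel' hdvd]
    push_cast at this
    rw [this]
    simp [ZMod.natCast_self]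
  have key : (2 : ZMod p)^(p-2) = ((((p:Int) + 1)/2 : Int) : ZMod p) :=
    mul_left_cancel₀ (pv_two_ne_zero p h5) (h2.trans h3.symm)
  rw [key]

-- ---------- B's divisor scan ----------

lemma pv_divsLoop_acc (n : Int) : ∀ (d : Int) (acc : List Int),
    ∃ t, pvDivsLoop n d acc = acc ++ t := by
  intro d acc
  fun_induction pvDivsLoop n d acc with
  | case1 d acc h ih =>
    obtain ⟨t, ht⟩ := ih
    split_ifs at ht ⊢ with h1 h2
    · exact ⟨[d] ++ [PySem.Int.floordiv n d] ++ t, by rw [ht]; simp⟩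
    · exact ⟨[d] ++ t, by rw [ht]; simp⟩
    · exact ⟨t, ht⟩
  | case2 d acc h => exact ⟨[], by simp⟩

lemma pv_divsLoop_pos (n : Int) : ∀ (d : Int) (acc : List Int), 1 ≤ d →
    (∀ x ∈ acc, 1 ≤ x) → ∀ x ∈ pvDivsLoop n d acc, 1 ≤ x := by
  intro d acc
  fun_induction pvDivsLoop n d acc with
  | case1 d acc h ih =>
    intro hd hacc
    have hdn : d ≤ n := by nlinarith
    apply ih (by omega)
    intro x hx
    have hq : 1 ≤ PySem.Int.floordiv n d := by
      rw [PySem.Int.floordiv_eq_ediv_of_pos (by omega)]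
      rw [Int.le_ediv_iff_mul_le (by omega)]
      omega
    split_ifs at hx with h1 h2
    · simp at hx
      rcases hx with hx | hx | hx
      · exact hacc x hx
      · omega
      · rw [hx]; exact hq
    · simp at hx
      rcases hx with hx | hx
      · exact hacc x hx
      · omega
    · exact hacc x hx
  | case2 d acc h => intro _ hacc; exact hacc

lemma pv_divsLoop_reach (n e : Int) (hn : 1 ≤ n) (he : 1 ≤ e) (hdvd : e ∣ n)
    (c : Int) (hc1 : 1 ≤ c) (hcc : c * c ≤ n)
    (hkey : ∀ acc : List Int, e ∈ (if PySem.Int.mod n c = 0 then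
        acc ++ [c] ++ (if c * c ≠ n then [PySem.Int.floordiv n c] else [])
      else acc)) :
    ∀ (k : Nat) (d : Int) (acc : List Int), 1 ≤ d → d ≤ c → (c - d).toNat = k →
      e ∈ pvDivsLoop n d acc := by
  intro k
  induction k with
  | zero =>
    intro d acc hd1 hdc hk
    have hdc' : d = c := by omega
    subst hdc'
    rw [pvDivsLoop, dif_pos hcc]
    obtain ⟨t, ht⟩ := pv_divsLoop_acc n (d+1)
      (if PySem.Int.mod n d = 0 then
        acc ++ [d] ++ (if d * d ≠ n then [PySem.Int.floordiv n d] else [])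
      else acc)
    rw [ht]
    exact List.mem_append_left _ (hkey acc)
  | succ k ih =>
    intro d acc hd1 hdc hk
    have hdd : d * d ≤ n := le_trans (by nlinarith) hcc
    rw [pvDivsLoop, dif_pos hdd]
    exact ih (d+1) _ (by omega) (by omega) (by omega)

lemma pv_divsLoop_complete (n e : Int) (hn : 1 ≤ n) (he : 1 ≤ e) (hdvd : e ∣ n) :
    e ∈ pvDivsLoop n 1 [] := by
  have hen : e ≤ n := Int.le_of_dvd (by omega) hdvd
  by_cases hee : e * e ≤ n
  · -- c = e
    refine pv_divsLoop_reach n e hn he hdvd e he hee ?_ (e-1).toNat 1 [] (by omega) (by omega) (by omega)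
    intro acc
    rw [if_pos ((PySem.Int.mod_eq_zero_iff_dvd n e).mpr hdvd)]
    split_ifs <;> simp
  · -- c = n / e
    set c := n / e with hc
    have hce : c * e = n := Int.ediv_mul_cancel hdvd
    have hc1 : 1 ≤ c := by
      rw [hc, Int.le_ediv_iff_mul_le (by omega)]
      omega
    have hclt : c < e := by nlinarith
    have hcc : c * c ≤ n := by nlinarith
    have hcdvd : c ∣ n := ⟨e, hce.symm⟩
    have hcne : c * c ≠ n := by
      intro hcn
      have : c * c = c * e := by rw [hcn, ← hce]
      have := mul_left_cancel₀ (by omega : c ≠ 0) this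
      omega
    have hnc : PySem.Int.floordiv n c = e := by
      rw [PySem.Int.floordiv_eq_ediv_of_pos (by omega), ← hce, mul_comm,
        Int.mul_ediv_cancel _ (by omega)]
    refine pv_divsLoop_reach n e hn he hdvd c hc1 hcc ?_ (c-1).toNat 1 [] (by omega) (by omega) (by omega)
    intro acc
    rw [if_pos ((PySem.Int.mod_eq_zero_iff_dvd n c).mpr hcdvd), if_pos hcne, hnc]
    simp

lemma pv_powMod_one_iff (p : Nat) [hp : Fact p.Prime] (h5 : 5 ≤ p) (d : Int) :
    (PySem.Int.powMod 2 d.toNat (p:Int) = 1) ↔ (2 : ZMod p)^(d.toNat) = 1 := by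
  rw [PySem.Int.powMod_eq_emod _ _ (by exact_mod_cast by omega : (0:Int) < (p:Int))]
  exact pv_pow_emod_eq_one_iff p h5 d.toNat

lemma pv_findOrd_eq (p : Nat) [hp : Fact p.Prime] (h5 : 5 ≤ p) :
    ∀ ds : List Int, ds.Pairwise (· ≤ ·) → ((orderOf (2 : ZMod p) : Nat) : Int) ∈ ds →
      (∀ x ∈ ds, 1 ≤ x) → pvFindOrd (p:Int) ds = ((orderOf (2 : ZMod p) : Nat) : Int) := by
  intro ds
  induction ds with
  | nil => intro _ hN _; simp at hN
  | cons d tl ih =>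
    intro hpw hN hpos
    rw [List.pairwise_cons] at hpw
    by_cases hP : PySem.Int.powMod 2 d.toNat (p:Int) = 1
    · rw [pvFindOrd, if_pos hP]
      have h2 : orderOf (2 : ZMod p) ∣ d.toNat :=
        orderOf_dvd_iff_pow_eq_one.mpr ((pv_powMod_one_iff p h5 d).mp hP)
      have hd1 : 1 ≤ d := hpos d List.mem_cons_self
      have hle : orderOf (2 : ZMod p) ≤ d.toNat := Nat.le_of_dvd (by omega) h2
      have hge : d ≤ ((orderOf (2 : ZMod p) : Nat) : Int) := by
        rcases List.mem_cons.mp hN with h | h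
        · omega
        · exact hpw.1 _ h
      omega
    · have hNP : PySem.Int.powMod 2 ((orderOf (2 : ZMod p) : Nat) : Int).toNat (p:Int) = 1 := by
        rw [pv_powMod_one_iff p h5]
        simpa using pow_orderOf_eq_one (2 : ZMod p)
      have hNd : ((orderOf (2 : ZMod p) : Nat) : Int) ≠ d := by
        intro h; rw [← h] at hP; exact hP hNP
      rw [pvFindOrd, if_neg hP]
      exact ih hpw.2 (by rcases List.mem_cons.mp hN with h | h; exacts [absurd h hNd, h])
        (fun x hx => hpos x (List.mem_cons_of_mem _ hx))

lemma pv_order_of_2_eq (p : Nat) [hp : Fact p.Prime] (h5 : 5 ≤ p) :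
    order_of_2 (p:Int) = ((orderOf (2 : ZMod p) : Nat) : Int) := by
  have hcast : (p:Int) - 1 = ((p - 1 : Nat) : Int) := by omega
  have hNdvd : ((orderOf (2 : ZMod p) : Nat) : Int) ∣ (p:Int) - 1 := by
    rw [hcast]
    exact_mod_cast pv_orderOf_dvd p h5
  have hperm := PySem.List.sorted_perm (pvDivsLoop ((p:Int)-1) 1 []) (fun x => x) false
  apply pv_findOrd_eq p h5
  · exact PySem.List.sorted_pairwise _ _
  · exact hperm.mem_iff.mpr (pv_divsLoop_complete _ _ (by omega) (by exact_mod_cast pv_orderOf_pos p h5) hNdvd)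
  · intro x hx
    exact pv_divsLoop_pos _ 1 [] (by omega) (by simp) x (hperm.mem_iff.mp hx)

-- ---------- the sampled M values ----------

lemma pv_mvals_eq (max_M : Int) (h1 : 1 ≤ max_M) :
    (if 10 ≤ max_M then
        PySem.List.sorted (PySem.Set.ofList (PySem.List.pyRange 1 (min (max_M + 1) 10) 1
            ++ [PySem.Int.floordiv max_M 2, max_M])) (fun x => x) false
      else PySem.List.pyRange 1 (min (max_M + 1) 10) 1)
    = (if max_M < 10 then PySem.List.pyRange 1 (max_M + 1) 1
        else PySem.List.pyRange 1 10 1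
             ++ (if 9 < PySem.Int.floordiv max_M 2 then [PySem.Int.floordiv max_M 2] else [])
             ++ [max_M]) := by
  by_cases h10 : 10 ≤ max_M
  · rw [if_pos h10, if_neg (by omega)]
    have hmin : min (max_M + 1) 10 = 10 := by omega
    rw [hmin]
    have hr9 : PySem.List.pyRange 1 10 1 = ([1,2,3,4,5,6,7,8,9] : List Int) := by decide
    set h := PySem.Int.floordiv max_M 2 with hh
    have hhe : h = max_M / 2 := PySem.Int.floordiv_eq_ediv_of_pos (by norm_num)
    have hlo : 5 ≤ h := by rw [hhe]; omega
    have hhi : h < max_M := by rw [hhe]; omega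
    have hsplit : ([1,2,3,4,5,6,7,8,9] : List Int) ++ [h, max_M]
        = (([1,2,3,4,5,6,7,8,9] ++ [h]) ++ [max_M]) := by simp
    rw [hr9, hsplit, PySem.Set.ofList_append_singleton, PySem.Set.ofList_append_singleton,
      PySem.Set.ofList_eq_self_of_nodup (xs := ([1,2,3,4,5,6,7,8,9] : List Int)) (by decide)]
    by_cases h9 : 9 < h
    · rw [if_pos h9, PySem.Set.add_of_not_mem (s := ([1,2,3,4,5,6,7,8,9] : List Int)) (x := h) (by simp; omega),
        PySem.Set.add_of_not_mem (by simp; omega)]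
      apply PySem.List.sorted_eq_of_perm_of_pairwise_lt
      · exact List.Perm.refl _
      · simp only [List.pairwise_append, List.pairwise_cons, List.mem_append, List.mem_cons,
          List.mem_singleton, List.Pairwise.nil]
        refine ⟨⟨?_, ?_⟩, ?_, ?_⟩ <;> first | decide | (intros; omega) | simp <;> omega
    · rw [if_neg h9, PySem.Set.add_of_mem (s := ([1,2,3,4,5,6,7,8,9] : List Int)) (x := h) (by simp; omega),
        PySem.Set.add_of_not_mem (by simp; omega)]
      apply PySem.List.sorted_eq_of_perm_of_pairwise_lt
      · simp
      · simp only [List.pairwise_append, List.pairwise_cons, List.mem_append, List.mem_cons,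
          List.mem_singleton, List.Pairwise.nil]
        refine ⟨?_, ?_, ?_⟩ <;> first | decide | (intros; omega) | simp <;> omega
  · rw [if_neg h10, if_pos (by omega)]
    have hmin : min (max_M + 1) 10 = max_M + 1 := by omega
    rw [hmin]

-- ---------- per-prime step equality and the main folds ----------

lemma pv_mod_mod (x : Int) (p : Nat) (h5 : 5 ≤ p) :
    PySem.Int.mod (PySem.Int.mod x (p:Int)) (p:Int) = PySem.Int.mod x (p:Int) := by
  have hpos : (0:Int) < (p:Int) := by exact_mod_cast by omega
  rw [PySem.Int.mod_eq_emod_of_pos hpos, PySem.Int.mod_eq_emod_of_pos hpos]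
  exact Int.emod_emod_of_dvd x dvd_rfl

lemma pv_step_eq (Mr : Option (List Int)) (p : Nat) (hp : p.Prime) (h5 : 5 ≤ p)
    (cases : List (Int × Int × Int × Int × Bool)) :
    stepA Mr cases p = stepB Mr cases p := by
  haveI : Fact p.Prime := ⟨hp⟩
  unfold stepA stepB
  rw [pv_gK2_eq p h5, pv_ordMod_eq p h5, pv_order_of_2_eq p h5]
  dsimp only
  rw [PySem.List.foldl_append_singleton_eq_map, pv_mod_mod _ p h5]
  set N := ((orderOf (2 : ZMod p) : Nat) : Int) with hN
  set mM := min (min (N - 2) 50) ((p:Int) - 2) with hmM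
  by_cases h1 : mM < 1
  · rw [if_pos h1, if_pos h1]
  · rw [if_neg h1, if_neg h1]
    cases Mr with
    | some mr => rfl
    | none =>
      dsimp only
      rw [pv_mvals_eq mM (by omega)]

lemma pv_fold_eq (Mr : Option (List Int)) : ∀ (L : List Nat), (∀ p ∈ L, p.Prime ∧ 2 ≤ p) →
    ∀ acc, (L.filter (fun p => decide (5 ≤ p))).foldl (stepA Mr) acc =
      L.foldl (fun cases (p : Nat) => if (p:Int) < 5 then cases else stepB Mr cases p) acc := by
  intro L
  induction L with
  | nil => intro _ acc; rfl
  | cons p tl ih =>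
    intro hall acc
    obtain ⟨hp, h2⟩ := hall p List.mem_cons_self
    have htl := fun q hq => hall q (List.mem_cons_of_mem _ hq)
    by_cases h5 : 5 ≤ p
    · rw [List.filter_cons_of_pos (by simpa using h5)]
      simp only [List.foldl_cons]
      rw [if_neg (by exact_mod_cast by omega), pv_step_eq Mr p hp h5]
      exact ih htl _
    · rw [List.filter_cons_of_neg (by simpa using h5)]
      simp only [List.foldl_cons]
      rw [if_pos (by exact_mod_cast by omega)]
      exact ih htl acc

-- ===== VERDICT (by name: the statement is the Claim_ definition above) =====
theorem generate_R1_cases_spec : Claim_equal_generate_R1_cases := by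
  intro mp Mr _hdom hpre
  unfold Spec_generate_R1_cases generate_R1_cases generate_R1_cases_alt
  have hn : 1 ≤ mp.toNat := by unfold Pre_generate_R1_cases at hpre; omega
  exact (pv_fold_eq Mr (pvPrimesUpTo mp.toNat)
    (fun p hp => pv_mem_primesUpTo mp.toNat p hn hp) []).symm ▸ rfl
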